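-- pv_equiv track=rewrite | github.com/synnada-ai/mithril | mithril/framework/common.py | adjust_list
-- ===== SOURCE A (Python) =====
-- def adjust_list(strings: list[str], max_len: int = 0) -> list[str]:
--     """Adjusts and reconstucts a list based on specified maximum length.
--     takes all strings in the list, put it to new string seperated
--     with comma, if length of the string exceeds the max_len, append this string to a
--     new list and continue to proceed
--
--     Examples:
--     >>> list1 = ["abcdef", "ghf", "1234", "ab", "c"]
--     >>> list2 = Table.adjust_list(list1, 7)
--     >>> list2
--     ["abcdef, ",
--     "ghf, 1234, ",
--     "ab, c"]
--
--     Args: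
--         strings (list[str]): list of strings
--         max_len (int, optional): maximum length of a string in a list. Defaults
--             to 0.
--
--     Returns:
--         list[str]: list of re-oredered strings
--     """
--     if not strings:
--         #  Fill empty strings with None
--         new_list: list[str] = ["None"]
--     else:
--         line_len = 0
--         new_str = ""
--         new_list = []
--         for string in strings:
--             new_str += string + ", "
--             line_len += len(string) + 2
--             if line_len > max_len:
--                 new_list.append(new_str)
--                 line_len = 0
--                 new_str = ""
--         new_list.append(new_str)
--         new_list[-1] = new_list[-1][:-2]
--     return new_list
-- ===== SOURCE B (Python) =====
-- def adjust_list(strings: list[str], max_len: int = 0) -> list[str]: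
--     if not strings:
--         return ["None"]
--     n = len(strings)
--     # prefix sums of len(s) + 2
--     pref = [0]
--     for s in strings:
--         pref.append(pref[-1] + len(s) + 2)
--     lines = []
--     base = 0
--     while True:
--         # binary search: first k in (base, n] with pref[k] > max_len + pref[base]
--         target = max_len + pref[base]
--         lo, hi = base + 1, n + 1
--         while lo < hi:
--             mid = (lo + hi) // 2
--             if pref[mid] > target:
--                 hi = mid
--             else:
--                 lo = mid + 1
--         k = lo
--         if k > n:
--             lines.append(", ".join(strings[base:]))
--             return lines
--         lines.append(", ".join(strings[base:k]) + ", ")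
--         base = k
-- ===== Notes on version B (the rewrite author's own statement) =====
-- stated objective: alternative
-- what changed: B replaces A's single incremental accumulation loop by a staged algorithm: it builds a prefix-sum array of the string lengths once, then finds each line's break point with a binary search over the prefix sums and renders the line by slicing and ', '.join, instead of growing one string and flushing it.
import Mathlib
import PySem

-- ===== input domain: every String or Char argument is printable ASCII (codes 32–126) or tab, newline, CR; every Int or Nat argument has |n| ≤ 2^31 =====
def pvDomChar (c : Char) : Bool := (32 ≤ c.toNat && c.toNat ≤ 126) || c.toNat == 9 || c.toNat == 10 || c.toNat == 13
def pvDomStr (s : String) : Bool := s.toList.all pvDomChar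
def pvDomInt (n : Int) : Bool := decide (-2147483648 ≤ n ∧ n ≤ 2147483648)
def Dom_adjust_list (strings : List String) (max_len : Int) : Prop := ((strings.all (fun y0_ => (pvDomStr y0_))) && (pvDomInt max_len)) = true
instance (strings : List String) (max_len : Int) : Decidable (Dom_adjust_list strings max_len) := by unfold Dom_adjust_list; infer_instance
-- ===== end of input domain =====

-- B replaces A's incremental string accumulation by a staged algorithm: a prefix-sum
-- array of the lengths, binary search for each line's break point, and slice+join per
-- line — same return value (objective: alternative).

-- ===== PORT A =====
-- loop body of A: new_str += string + ", "; line_len += len(string) + 2; flush on line_len > max_len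
def adjStepA (max_len : Int) (acc : Int × String × List String) (string : String) : Int × String × List String :=
  let new_str := acc.2.1 ++ string ++ ", "
  let line_len := acc.1 + PySem.Str.len string + 2
  if line_len > max_len then (0, "", acc.2.2 ++ [new_str]) else (line_len, new_str, acc.2.2)

def adjust_list (strings : List String) (max_len : Int) : List String :=
  if strings = [] then ["None"]
  else
    let st := strings.foldl (adjStepA max_len) (0, "", [])
    let new_list := st.2.2 ++ [st.2.1]
    -- new_list[-1] = new_list[-1][:-2]
    new_list.dropLast ++ [PySem.Str.slice new_list.getLast! none (some (-2))]

-- ===== PORT B =====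
-- pref = [0]; for s in strings: pref.append(pref[-1] + len(s) + 2)
def prefB (strings : List String) : List Int :=
  strings.foldl (fun p s => p ++ [p.getLast! + PySem.Str.len s + 2]) [(0 : Int)]

-- inner while loop: first k in [lo, hi) with pref[k] > target (hi if none);
-- fuel = hi - lo bounds the iteration count (the loop halves the interval each step)
def bsearchGo (pref : List Int) (target : Int) : Nat → Nat → Nat → Nat
  | 0, lo, _hi => lo
  | fuel + 1, lo, hi =>
    if lo < hi then
      if pref.getD ((lo + hi) / 2) 0 > target then bsearchGo pref target fuel lo ((lo + hi) / 2)
      else bsearchGo pref target fuel ((lo + hi) / 2 + 1) hi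
    else lo

def bsearchB (pref : List Int) (target : Int) (lo hi : Nat) : Nat :=
  bsearchGo pref target (hi - lo) lo hi

-- outer while loop of B, one iteration per output line; fuel bounds the lines emitted
def linesGo (strings : List String) (max_len : Int) (pref : List Int) (n : Nat) : Nat → Nat → List String
  | 0, _base => []
  | fuel + 1, base =>
    let k := bsearchB pref (max_len + pref.getD base 0) (base + 1) (n + 1)
    if k > n then [PySem.Str.join ", " (PySem.List.slice strings (some (base : Int)) none)]
    else (PySem.Str.join ", " (PySem.List.slice strings (some (base : Int)) (some (k : Int))) ++ ", ")
          :: linesGo strings max_len pref n fuel k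

def linesB (strings : List String) (max_len : Int) (pref : List Int) (n base : Nat) : List String :=
  linesGo strings max_len pref n (n + 1 - base) base

def adjust_list_alt (strings : List String) (max_len : Int) : List String :=
  if strings = [] then ["None"]
  else linesB strings max_len (prefB strings) strings.length 0

-- ===== PRECONDITION & SPEC =====
def Spec_adjust_list (strings : List String) (max_len : Int) (out : List String) : Prop := out = adjust_list_alt strings max_len
instance (strings : List String) (max_len : Int) (out : List String) : Decidable (Spec_adjust_list strings max_len out) := by unfold Spec_adjust_list; infer_instance

-- ===== CLAIM (what is proved, stated in full; the proofs are below) =====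
def Claim_equal_adjust_list : Prop := ∀ (strings : List String) (max_len : Int), Dom_adjust_list strings max_len → Spec_adjust_list strings max_len (adjust_list strings max_len)

-- ===== LEMMAS AND PROOFS =====

-- proof-only: group-level view of A's loop (flush whole groups instead of strings)
def grpStep (max_len : Int) (acc : Int × List String × List (List String)) (s : String) : Int × List String × List (List String) :=
  let cur := acc.2.1 ++ [s]
  let cur_len := acc.1 + PySem.Str.len s + 2
  if cur_len > max_len then (0, ([] : List String), acc.2.2 ++ [cur]) else (cur_len, cur, acc.2.2)

def fmtG (g : List String) : String := PySem.Str.join ", " g ++ ", "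
def fmtC (g : List String) : String := if g = [] then "" else fmtG g

def sumLen (xs : List String) : Int := (xs.map (fun s => PySem.Str.len s + 2)).sum

-- index of the first flush in A's loop started at running length ll (1-based), if any
def firstOver (max_len : Int) : Int → List String → Option Nat
  | _, [] => none
  | ll, s :: r =>
      if ll + PySem.Str.len s + 2 > max_len then some 1
      else (firstOver max_len (ll + PySem.Str.len s + 2) r).map (· + 1)

lemma join_append_singleton (sep : List Char) (l : List (List Char)) (x : List Char) (h : l ≠ []) :
    PySem.Chars.join sep (l ++ [x]) = PySem.Chars.join sep l ++ sep ++ x := by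
  induction l with
  | nil => exact absurd rfl h
  | cons a l ih =>
    cases l with
    | nil => simp [PySem.Chars.join_cons_cons, PySem.Chars.join_singleton]
    | cons b l' =>
      have : ((a :: b :: l') ++ [x]) = a :: ((b :: l') ++ [x]) := by simp
      rw [this, show (b :: l') ++ [x] = b :: (l' ++ [x]) from by simp] at *
      rw [PySem.Chars.join_cons_cons, ih (by simp), PySem.Chars.join_cons_cons]
      simp [List.append_assoc]

lemma fmt_push (cur : List String) (s : String) :
    fmtC cur ++ s ++ ", " = fmtG (cur ++ [s]) := by
  apply String.toList_inj.mp
  by_cases h : cur = []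
  · subst h
    simp [fmtC, fmtG, PySem.Str.toList_join, PySem.Chars.join_singleton]
  · simp only [fmtC, fmtG, if_neg h]
    simp only [String.toList_append, PySem.Str.toList_join, List.map_append, List.map_cons,
      List.map_nil]
    rw [join_append_singleton _ (cur.map String.toList) s.toList (by simpa using h)]

lemma slice_fmt (cur : List String) :
    PySem.Str.slice (fmtC cur) none (some (-2)) = PySem.Str.join ", " cur := by
  apply String.toList_inj.mp
  rw [PySem.Str.toList_slice, PySem.Chars.slice_eq_listSlice,
    PySem.List.slice_to_neg_ofNat _ 2 (by omega)]
  by_cases h : cur = []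
  · subst h; simp [fmtC, PySem.Str.toList_join, PySem.Chars.join_nil]
  · simp only [fmtC, fmtG, if_neg h]
    have : (fmtG cur).toList = (PySem.Str.join ", " cur).toList ++ (", ").toList := by
      simp [fmtG]
    simp only [fmtG] at this ⊢
    rw [this]
    simp

lemma loop_rel (max_len : Int) (strings : List String) :
    ∀ (ll : Int) (cur : List String) (gs : List (List String)),
      strings.foldl (adjStepA max_len) (ll, fmtC cur, gs.map fmtG) =
        ((strings.foldl (grpStep max_len) (ll, cur, gs)).1,
         fmtC (strings.foldl (grpStep max_len) (ll, cur, gs)).2.1,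
         (strings.foldl (grpStep max_len) (ll, cur, gs)).2.2.map fmtG) := by
  induction strings with
  | nil => intro ll cur gs; rfl
  | cons s rest ih =>
    intro ll cur gs
    simp only [List.foldl_cons]
    have hstep : adjStepA max_len (ll, fmtC cur, gs.map fmtG) s =
        if ll + PySem.Str.len s + 2 > max_len
        then (0, fmtC [], (gs ++ [cur ++ [s]]).map fmtG)
        else (ll + PySem.Str.len s + 2, fmtC (cur ++ [s]), gs.map fmtG) := by
      simp only [adjStepA, fmt_push]
      by_cases hc : ll + PySem.Str.len s + 2 > max_len
      · simp [fmtC]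
      · simp [fmtC, fmtG]
    have hstepB : grpStep max_len (ll, cur, gs) s =
        if ll + PySem.Str.len s + 2 > max_len
        then (0, ([] : List String), gs ++ [cur ++ [s]])
        else (ll + PySem.Str.len s + 2, cur ++ [s], gs) := by
      simp only [grpStep]
    rw [hstep, hstepB]
    by_cases hc : ll + PySem.Str.len s + 2 > max_len
    · simp only [if_pos hc]; exact ih 0 [] (gs ++ [cur ++ [s]])
    · simp only [if_neg hc]; exact ih (ll + PySem.Str.len s + 2) (cur ++ [s]) gs

-- ---- prefix-sum characterisation ----

def tailScan (c : Int) : List String → List Int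
  | [] => []
  | s :: r => (c + PySem.Str.len s + 2) :: tailScan (c + PySem.Str.len s + 2) r

lemma prefB_foldl (xs : List String) : ∀ (acc : List Int) (c : Int),
    xs.foldl (fun p s => p ++ [p.getLast! + PySem.Str.len s + 2]) (acc ++ [c])
      = (acc ++ [c]) ++ tailScan c xs := by
  induction xs with
  | nil => intro acc c; simp [tailScan]
  | cons s r ih =>
    intro acc c
    simp only [List.foldl_cons]
    have hl : (acc ++ [c]).getLast! = c := by simp [List.getLast!_eq_getLast?_getD]
    rw [hl]
    have := ih (acc ++ [c]) (c + PySem.Str.len s + 2)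
    simp only [List.append_assoc] at this ⊢
    rw [this]
    simp [tailScan]

lemma tailScan_getD (xs : List String) : ∀ (c : Int) (i : Nat), i < xs.length →
    (tailScan c xs).getD i 0 = c + sumLen (xs.take (i + 1)) := by
  induction xs with
  | nil => intro c i h; simp at h
  | cons s r ih =>
    intro c i h
    cases i with
    | zero => simp [tailScan, sumLen]; ring
    | succ j =>
      simp only [tailScan, List.getD_cons_succ]
      rw [ih _ j (by simpa using h)]
      simp [sumLen]
      ring

lemma prefB_eq (strings : List String) : prefB strings = 0 :: tailScan 0 strings := by
  have := prefB_foldl strings [] 0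
  simpa [prefB] using this

lemma prefB_getD (strings : List String) (j : Nat) (h : j ≤ strings.length) :
    (prefB strings).getD j 0 = sumLen (strings.take j) := by
  rw [prefB_eq]
  cases j with
  | zero => simp [sumLen]
  | succ i =>
    simp only [List.getD_cons_succ]
    rw [tailScan_getD strings 0 i (by omega)]
    simp

lemma sumLen_append (xs ys : List String) : sumLen (xs ++ ys) = sumLen xs + sumLen ys := by
  simp [sumLen]

lemma sumLen_nonneg (xs : List String) : 0 ≤ sumLen xs := by
  induction xs with
  | nil => simp [sumLen]
  | cons s r ih =>
    have : (0:Int) ≤ PySem.Str.len s + 2 := by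
      simp only [PySem.Str.len_eq]; omega
    simp only [sumLen, List.map_cons, List.sum_cons]
    have := ih
    simp only [sumLen] at this
    omega

lemma sumLen_take_mono (strings : List String) (i j : Nat) (hij : i ≤ j) :
    sumLen (strings.take i) ≤ sumLen (strings.take j) := by
  have : strings.take j = strings.take i ++ ((strings.drop i).take (j - i)) := by
    rw [← List.take_add]
    congr 1
    omega
  rw [this, sumLen_append]
  have := sumLen_nonneg ((strings.drop i).take (j - i))
  omega

lemma sum_take_drop (strings : List String) (base j : Nat) :
    sumLen ((strings.drop base).take j) = sumLen (strings.take (base + j)) - sumLen (strings.take base) := by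
  rw [List.take_add, sumLen_append]
  ring

-- ---- binary-search spec ----

lemma bsearchGo_ge (pref : List Int) (target : Int) :
    ∀ fuel lo hi, lo ≤ bsearchGo pref target fuel lo hi := by
  intro fuel
  induction fuel with
  | zero => intro lo hi; simp [bsearchGo]
  | succ f ih =>
    intro lo hi
    simp only [bsearchGo]
    by_cases h : lo < hi
    · rw [if_pos h]
      by_cases hq : pref.getD ((lo + hi) / 2) 0 > target
      · rw [if_pos hq]; exact ih lo ((lo + hi) / 2)
      · rw [if_neg hq]; exact le_trans (by omega) (ih ((lo + hi) / 2 + 1) hi)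
    · rw [if_neg h]

lemma bsearchGo_le (pref : List Int) (target : Int) :
    ∀ fuel lo hi, lo ≤ hi → bsearchGo pref target fuel lo hi ≤ hi := by
  intro fuel
  induction fuel with
  | zero => intro lo hi h; simpa [bsearchGo] using h
  | succ f ih =>
    intro lo hi hlh
    simp only [bsearchGo]
    by_cases h : lo < hi
    · rw [if_pos h]
      by_cases hq : pref.getD ((lo + hi) / 2) 0 > target
      · rw [if_pos hq]; exact le_trans (ih lo ((lo + hi) / 2) (by omega)) (by omega)
      · rw [if_neg hq]; exact ih ((lo + hi) / 2 + 1) hi (by omega)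
    · rw [if_neg h]; omega

lemma bsearchGo_spec (pref : List Int) (target : Int) (n : Nat)
    (hmono : ∀ i j, i ≤ j → j ≤ n → pref.getD i 0 ≤ pref.getD j 0) :
    ∀ fuel lo hi, hi - lo ≤ fuel → hi ≤ n + 1 →
      (∀ i, lo ≤ i → i < bsearchGo pref target fuel lo hi → i ≤ n → pref.getD i 0 ≤ target) ∧
      (bsearchGo pref target fuel lo hi < hi → pref.getD (bsearchGo pref target fuel lo hi) 0 > target) := by
  intro fuel
  induction fuel with
  | zero =>
    intro lo hi hf hn
    simp only [bsearchGo]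
    exact ⟨by intro i h1 h2 h3; omega, by intro h'; omega⟩
  | succ f ih =>
    intro lo hi hf hn
    simp only [bsearchGo]
    by_cases h : lo < hi
    · rw [if_pos h]
      by_cases hq : pref.getD ((lo + hi) / 2) 0 > target
      · rw [if_pos hq]
        obtain ⟨ihb, ihc⟩ := ih lo ((lo + hi) / 2) (by omega) (by omega)
        refine ⟨fun i h1 h2 h3 => ihb i h1 h2 h3, fun hlt => ?_⟩
        by_cases hr : bsearchGo pref target f lo ((lo + hi) / 2) < (lo + hi) / 2
        · exact ihc hr
        · have hle : bsearchGo pref target f lo ((lo + hi) / 2) ≤ (lo + hi) / 2 :=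
            bsearchGo_le pref target f lo ((lo + hi) / 2) (by omega)
          have heq : bsearchGo pref target f lo ((lo + hi) / 2) = (lo + hi) / 2 := by omega
          rw [heq]; exact hq
      · rw [if_neg hq]
        obtain ⟨ihb, ihc⟩ := ih ((lo + hi) / 2 + 1) hi (by omega) hn
        refine ⟨fun i h1 h2 h3 => ?_, fun hlt => ihc hlt⟩
        by_cases hi' : (lo + hi) / 2 + 1 ≤ i
        · exact ihb i hi' h2 h3
        · have hmid : (lo + hi) / 2 ≤ n := by omega
          have := hmono i ((lo + hi) / 2) (by omega) hmid
          omega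
    · rw [if_neg h]
      exact ⟨by intro i h1 h2 h3; omega, by intro h'; omega⟩

lemma bsearchB_ge (pref : List Int) (target : Int) (lo hi : Nat) :
    lo ≤ bsearchB pref target lo hi := bsearchGo_ge pref target (hi - lo) lo hi

lemma bsearchB_le (pref : List Int) (target : Int) (lo hi : Nat) (h : lo ≤ hi) :
    bsearchB pref target lo hi ≤ hi := bsearchGo_le pref target (hi - lo) lo hi h

lemma bsearchB_spec (pref : List Int) (target : Int) (n : Nat)
    (hmono : ∀ i j, i ≤ j → j ≤ n → pref.getD i 0 ≤ pref.getD j 0)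
    (lo hi : Nat) (hn : hi ≤ n + 1) :
    (∀ i, lo ≤ i → i < bsearchB pref target lo hi → i ≤ n → pref.getD i 0 ≤ target) ∧
    (bsearchB pref target lo hi < hi → pref.getD (bsearchB pref target lo hi) 0 > target) :=
  bsearchGo_spec pref target n hmono (hi - lo) lo hi (by omega) hn

-- ---- firstOver spec ----

lemma firstOver_none (ml : Int) (xs : List String) : ∀ (ll : Int), firstOver ml ll xs = none →
    ∀ k, 1 ≤ k → k ≤ xs.length → ll + sumLen (xs.take k) ≤ ml := by
  induction xs with
  | nil => intro ll _ k h1 h2; simp at h2; omega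
  | cons s r ih =>
    intro ll h k h1 h2
    simp only [firstOver] at h
    by_cases hc : ll + PySem.Str.len s + 2 > ml
    · rw [if_pos hc] at h; exact absurd h (by simp)
    · rw [if_neg hc] at h
      have hr : firstOver ml (ll + PySem.Str.len s + 2) r = none := by
        simpa using h
      cases k with
      | zero => omega
      | succ j =>
        cases j with
        | zero =>
          simp only [List.take_succ_cons, List.take_zero, sumLen, List.map_cons, List.map_nil,
            List.sum_cons, List.sum_nil, PySem.Str.len_eq] at hc ⊢
          omega
        | succ j' =>
          have hih := ih (ll + PySem.Str.len s + 2) hr (j' + 1) (by omega) (by simpa using h2)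
          simp only [List.take_succ_cons, sumLen, List.map_cons, List.sum_cons,
            PySem.Str.len_eq] at hih ⊢
          omega

lemma firstOver_some (ml : Int) (xs : List String) : ∀ (ll : Int) (k : Nat), firstOver ml ll xs = some k →
    1 ≤ k ∧ k ≤ xs.length ∧ ll + sumLen (xs.take k) > ml ∧
      ∀ j, 1 ≤ j → j < k → ll + sumLen (xs.take j) ≤ ml := by
  induction xs with
  | nil => intro ll k h; simp [firstOver] at h
  | cons s r ih =>
    intro ll k h
    simp only [firstOver] at h
    by_cases hc : ll + PySem.Str.len s + 2 > ml
    · rw [if_pos hc] at h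
      cases h
      refine ⟨by omega, by simp, ?_, by intro j h1 h2; omega⟩
      simp only [List.take_succ_cons, List.take_zero, sumLen, List.map_cons, List.map_nil,
        List.sum_cons, List.sum_nil, PySem.Str.len_eq] at hc ⊢
      omega
    · rw [if_neg hc] at h
      cases hfo : firstOver ml (ll + PySem.Str.len s + 2) r with
      | none => rw [hfo] at h; simp at h
      | some m =>
        rw [hfo] at h; simp at h
        obtain ⟨h1, h2, h3, h4⟩ := ih (ll + PySem.Str.len s + 2) m hfo
        subst h
        refine ⟨by omega, by simpa using Nat.add_le_add_right h2 1, ?_, ?_⟩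
        · simp only [List.take_succ_cons, sumLen, List.map_cons, List.sum_cons,
            PySem.Str.len_eq] at h3 hc ⊢
          omega
        · intro j hj1 hj2
          cases j with
          | zero => omega
          | succ j' =>
            cases j' with
            | zero =>
              simp only [List.take_succ_cons, List.take_zero, sumLen, List.map_cons, List.map_nil,
                List.sum_cons, List.sum_nil, PySem.Str.len_eq] at hc ⊢
              omega
            | succ j'' =>
              have hih := h4 (j'' + 1) (by omega) (by omega)
              simp only [List.take_succ_cons, sumLen, List.map_cons, List.sum_cons,
                PySem.Str.len_eq] at hih hc ⊢
              omega

-- ---- A's group loop split at the first flush ----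

lemma foldG_split (ml : Int) (xs : List String) : ∀ (ll : Int) (cur : List String) (gs : List (List String)),
    xs.foldl (grpStep ml) (ll, cur, gs) =
      match firstOver ml ll xs with
      | none => (ll + sumLen xs, cur ++ xs, gs)
      | some k => (xs.drop k).foldl (grpStep ml) (0, [], gs ++ [cur ++ xs.take k]) := by
  induction xs with
  | nil => intro ll cur gs; simp [firstOver, sumLen]
  | cons s r ih =>
    intro ll cur gs
    simp only [List.foldl_cons, grpStep, firstOver]
    by_cases hc : ll + PySem.Str.len s + 2 > ml
    · simp only [if_pos hc]
      simp
    · simp only [if_neg hc]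
      rw [ih (ll + PySem.Str.len s + 2) (cur ++ [s]) gs]
      cases hfo : firstOver ml (ll + PySem.Str.len s + 2) r with
      | none =>
        simp [sumLen]
        ring
      | some m =>
        simp

lemma foldG_split_none (ml : Int) (xs : List String) (ll : Int) (cur : List String)
    (gs : List (List String)) (h : firstOver ml ll xs = none) :
    xs.foldl (grpStep ml) (ll, cur, gs) = (ll + sumLen xs, cur ++ xs, gs) := by
  rw [foldG_split ml xs ll cur gs, h]

lemma foldG_split_some (ml : Int) (xs : List String) (ll : Int) (cur : List String)
    (gs : List (List String)) (k : Nat) (h : firstOver ml ll xs = some k) :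
    xs.foldl (grpStep ml) (ll, cur, gs)
      = (xs.drop k).foldl (grpStep ml) (0, [], gs ++ [cur ++ xs.take k]) := by
  rw [foldG_split ml xs ll cur gs, h]

-- ---- main correspondence: rendering A's group loop = B's line loop ----

lemma mainG (strings : List String) (ml : Int) :
    ∀ (fuel base : Nat), strings.length + 1 - base ≤ fuel → base ≤ strings.length →
      ∀ (gs : List (List String)),
      ((strings.drop base).foldl (grpStep ml) (0, [], gs)).2.2.map fmtG
        ++ [PySem.Str.join ", " ((strings.drop base).foldl (grpStep ml) (0, [], gs)).2.1]
      = gs.map fmtG ++ linesGo strings ml (prefB strings) strings.length fuel base := by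
  intro fuel
  induction fuel with
  | zero => intro base hm hbase gs; omega
  | succ f IH =>
    intro base hm hbase gs
    set n := strings.length with hn
    set pref := prefB strings with hpref
    set xs := strings.drop base with hxs
    have hxslen : xs.length = n - base := by simp [hxs, hn]
    have hmono : ∀ i j, i ≤ j → j ≤ n → pref.getD i 0 ≤ pref.getD j 0 := by
      intro i j hij hj
      rw [hpref, prefB_getD strings i (by omega), prefB_getD strings j (by omega)]
      exact sumLen_take_mono strings i j hij
    set target := ml + pref.getD base 0 with htarget
    set k := bsearchB pref target (base + 1) (n + 1) with hk
    obtain ⟨hb, hc⟩ := bsearchB_spec pref target n hmono (base + 1) (n + 1) (by omega)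
    have hkge : base + 1 ≤ k := bsearchB_ge pref target (base + 1) (n + 1)
    have hkle : k ≤ n + 1 := bsearchB_le pref target (base + 1) (n + 1) (by omega)
    have hQ : ∀ j, base + 1 ≤ j → j ≤ n → (pref.getD j 0 > target ↔ sumLen (xs.take (j - base)) > ml) := by
      intro j h1 h2
      rw [hpref, prefB_getD strings j (by omega), htarget, hpref, prefB_getD strings base (by omega)]
      rw [hxs, sum_take_drop strings base (j - base)]
      have hbj : base + (j - base) = j := by omega
      rw [hbj]
      omega
    rcases hfo : firstOver ml 0 xs with _ | j
    · -- no flush: everything fits on the last line, and the binary search returns n + 1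
      rw [foldG_split_none ml xs 0 [] gs hfo]
      have hnone := firstOver_none ml xs 0 hfo
      have hkn : k = n + 1 := by
        by_contra hne
        have hklt : k ≤ n := by omega
        have hq := (hQ k hkge hklt).mp (hc (by omega))
        have := hnone (k - base) (by omega) (by omega)
        omega
      simp only [linesGo]
      rw [← htarget, ← hk, hkn]
      simp only [show n + 1 > n from by omega]
      rw [PySem.List.slice_from_natCast]
      simp [hxs]
    · -- flush at j: the binary search finds the break at base + j
      rw [foldG_split_some ml xs 0 [] gs j hfo]
      obtain ⟨hj1, hj2, hj3, hj4⟩ := firstOver_some ml xs 0 j hfo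
      have hjn : base + j ≤ n := by omega
      have hkj : k = base + j := by
        by_contra hne
        rcases Nat.lt_or_ge k (base + j) with hlt | hge
        · have hq := (hQ k hkge (by omega)).mp (hc (by omega))
          have := hj4 (k - base) (by omega) (by omega)
          omega
        · have hple := hb (base + j) (by omega) (by omega) (by omega)
          have hiff := hQ (base + j) (by omega) (by omega)
          rw [Nat.add_sub_cancel_left] at hiff
          have := hiff.mpr (by omega)
          omega
      simp only [linesGo]
      rw [← htarget, ← hk, hkj]
      simp only [show ¬ (base + j > n) from by omega]
      have hslice : PySem.List.slice strings (some ((base : Nat) : Int)) (some (((base + j : Nat)) : Int)) = xs.take j := by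
        rw [PySem.List.slice_toNat strings (by omega) (by omega), hxs]
        simp only [Int.toNat_natCast]
        congr 1
        omega
      rw [hslice]
      have hdd : xs.drop j = strings.drop (base + j) := by
        rw [hxs, List.drop_drop]
      rw [List.nil_append, hdd]
      have hIH := IH (base + j) (by omega) (by omega) (gs ++ [xs.take j])
      rw [hIH]
      simp [fmtG]

-- ===== VERDICT (by name: the statement is the Claim_ definition above) =====
theorem adjust_list_spec : Claim_equal_adjust_list := by
  unfold Claim_equal_adjust_list
  intro strings max_len _
  unfold Spec_adjust_list adjust_list adjust_list_alt
  by_cases h : strings = []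
  · simp [h]
  · simp only [if_neg h]
    have h0 : ((0 : Int), "", ([] : List String)) = (0, fmtC [], ([] : List (List String)).map fmtG) := by
      simp [fmtC]
    rw [h0, loop_rel max_len strings 0 [] []]
    have hm := mainG strings max_len (strings.length + 1 - 0) 0 (by omega) (by omega) []
    simp only [List.drop_zero, List.map_nil, List.nil_append] at hm
    simp only [List.dropLast_concat]
    have hgl : ∀ (l : List String) (a : String), (l ++ [a]).getLast! = a := by
      intro l a; simp [List.getLast!_eq_getLast?_getD]
    rw [hgl, slice_fmt]
    rw [linesB]
    exact hm
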